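-- pv_equiv track=rewrite | github.com/tiagob77-coder/Portugal-Vivo | backend/planner_api.py | _assign_time_period
-- ===== SOURCE A (Python) =====
-- PERIOD_CATEGORIES = {
--     "manha": ["museus", "percursos_pedestres", "ecovias_passadicos", "castelos",
--               "palacios_solares", "miradouros", "natureza_especializada",
--               "arqueologia_geologia", "biodiversidade_avistamentos", "fauna_autoctone",
--               "flora_autoctone", "flora_botanica", "aventura_natureza",
--               "patrimonio_ferroviario", "termas_banhos", "mercados_feiras",
--               "arte_urbana", "oficios_artesanato"],
--     "almoco": ["restaurantes_gastronomia", "tabernas_historicas", "pratos_tipicos",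
--                "mercados_feiras", "docaria_regional"],
--     "tarde": ["praias_fluviais", "cascatas_pocos", "barragens_albufeiras",
--               "praias_bandeira_azul", "praias_fluviais_mar", "surf",
--               "agroturismo_enoturismo", "produtores_dop", "moinhos_azenhas",
--               "perolas_portugal", "rotas_tematicas", "grande_expedicao",
--               "museus", "castelos", "palacios_solares"],
--     "fim_tarde": ["miradouros", "cascatas_pocos", "praias_fluviais",
--                   "praias_bandeira_azul", "arte_urbana", "docaria_regional",
--                   "agroturismo_enoturismo"],
--     "noite": ["restaurantes_gastronomia", "tabernas_historicas",
--               "festas_romarias", "festivais_musica", "musica_tradicional"],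
-- }
--
-- def _assign_time_period(poi: dict, period_preference: str) -> str:
--     """Assign a POI to the most suitable time period."""
--     cat = poi.get("category", "")
--     for period, cats in PERIOD_CATEGORIES.items():
--         if cat in cats and period == period_preference:
--             return period
--     # Fallback: any matching period
--     for period, cats in PERIOD_CATEGORIES.items():
--         if cat in cats:
--             return period
--     return "tarde"
-- ===== SOURCE B (Python) =====
-- PERIOD_CATEGORIES = {
--     "manha": ["museus", "percursos_pedestres", "ecovias_passadicos", "castelos",
--               "palacios_solares", "miradouros", "natureza_especializada",
--               "arqueologia_geologia", "biodiversidade_avistamentos", "fauna_autoctone",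
--               "flora_autoctone", "flora_botanica", "aventura_natureza",
--               "patrimonio_ferroviario", "termas_banhos", "mercados_feiras",
--               "arte_urbana", "oficios_artesanato"],
--     "almoco": ["restaurantes_gastronomia", "tabernas_historicas", "pratos_tipicos",
--                "mercados_feiras", "docaria_regional"],
--     "tarde": ["praias_fluviais", "cascatas_pocos", "barragens_albufeiras",
--               "praias_bandeira_azul", "praias_fluviais_mar", "surf",
--               "agroturismo_enoturismo", "produtores_dop", "moinhos_azenhas",
--               "perolas_portugal", "rotas_tematicas", "grande_expedicao",
--               "museus", "castelos", "palacios_solares"],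
--     "fim_tarde": ["miradouros", "cascatas_pocos", "praias_fluviais",
--                   "praias_bandeira_azul", "arte_urbana", "docaria_regional",
--                   "agroturismo_enoturismo"],
--     "noite": ["restaurantes_gastronomia", "tabernas_historicas",
--               "festas_romarias", "festivais_musica", "musica_tradicional"],
-- }
--
-- # Reverse index: category -> ordered list of periods containing it (insertion order).
-- PERIODS_BY_CATEGORY = {}
-- for _period, _cats in PERIOD_CATEGORIES.items():
--     for _c in _cats:
--         PERIODS_BY_CATEGORY.setdefault(_c, []).append(_period)
--
--
-- def _assign_time_period(poi: dict, period_preference: str) -> str: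
--     """Assign a POI to the most suitable time period."""
--     periods = PERIODS_BY_CATEGORY.get(poi.get("category", ""), [])
--     if period_preference in periods:
--         return period_preference
--     return periods[0] if periods else "tarde"
-- ===== Notes on version B (the rewrite author's own statement) =====
-- stated objective: simpler
-- what changed: Replaces the two ordered scans over all period lists with a reverse index (category -> ordered periods) built once at module load, so the function body is a single table lookup.
import Mathlib
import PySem

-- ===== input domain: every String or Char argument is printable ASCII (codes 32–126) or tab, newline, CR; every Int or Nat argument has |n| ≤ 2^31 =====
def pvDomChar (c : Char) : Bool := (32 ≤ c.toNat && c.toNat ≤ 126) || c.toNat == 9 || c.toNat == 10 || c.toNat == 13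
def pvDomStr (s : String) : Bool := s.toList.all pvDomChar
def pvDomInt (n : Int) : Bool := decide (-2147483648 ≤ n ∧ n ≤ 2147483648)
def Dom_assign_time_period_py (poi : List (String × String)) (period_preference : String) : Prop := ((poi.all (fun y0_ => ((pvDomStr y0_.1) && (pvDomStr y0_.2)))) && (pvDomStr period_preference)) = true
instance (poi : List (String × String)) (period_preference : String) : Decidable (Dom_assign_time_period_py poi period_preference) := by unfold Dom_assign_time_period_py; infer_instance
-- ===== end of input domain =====

-- B replaces A's two ordered scans over the period table by a reverse index
-- (category -> ordered list of periods) built once, then a single lookup (objective: simpler).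

-- ===== PORT A =====
def PERIOD_CATEGORIES : PySem.Dict String (List String) := PySem.Dict.ofList
  [("manha", ["museus", "percursos_pedestres", "ecovias_passadicos", "castelos",
              "palacios_solares", "miradouros", "natureza_especializada",
              "arqueologia_geologia", "biodiversidade_avistamentos", "fauna_autoctone",
              "flora_autoctone", "flora_botanica", "aventura_natureza",
              "patrimonio_ferroviario", "termas_banhos", "mercados_feiras",
              "arte_urbana", "oficios_artesanato"]),
   ("almoco", ["restaurantes_gastronomia", "tabernas_historicas", "pratos_tipicos",
               "mercados_feiras", "docaria_regional"]),
   ("tarde", ["praias_fluviais", "cascatas_pocos", "barragens_albufeiras",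
              "praias_bandeira_azul", "praias_fluviais_mar", "surf",
              "agroturismo_enoturismo", "produtores_dop", "moinhos_azenhas",
              "perolas_portugal", "rotas_tematicas", "grande_expedicao",
              "museus", "castelos", "palacios_solares"]),
   ("fim_tarde", ["miradouros", "cascatas_pocos", "praias_fluviais",
                  "praias_bandeira_azul", "arte_urbana", "docaria_regional",
                  "agroturismo_enoturismo"]),
   ("noite", ["restaurantes_gastronomia", "tabernas_historicas",
              "festas_romarias", "festivais_musica", "musica_tradicional"])]

-- first loop of A: first period with cat in cats AND period == period_preference
def atpLoop1 : List (String × List String) → String → String → Option String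
  | [], _, _ => none
  | (period, cats) :: rest, cat, pref =>
    if cats.contains cat && period == pref then some period else atpLoop1 rest cat pref

-- second loop of A: first period with cat in cats
def atpLoop2 : List (String × List String) → String → Option String
  | [], _ => none
  | (period, cats) :: rest, cat =>
    if cats.contains cat then some period else atpLoop2 rest cat

def assign_time_period_py (poi : List (String × String)) (period_preference : String) : String :=
  let cat := (PySem.Dict.mk poi).getD "category" ""
  match atpLoop1 PERIOD_CATEGORIES.items cat period_preference with
  | some p => p
  | none =>
    match atpLoop2 PERIOD_CATEGORIES.items cat with
    | some p => p
    | none => "tarde"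

-- ===== PORT B =====
-- reverse index built once: category -> ordered list of periods containing it
def PERIODS_BY_CATEGORY : PySem.Dict String (List String) :=
  PERIOD_CATEGORIES.items.foldl
    (fun d e => e.2.foldl (fun d c => d.modify c [] (fun l => l ++ [e.1])) d)
    PySem.Dict.empty

def assign_time_period_py_alt (poi : List (String × String)) (period_preference : String) : String :=
  let periods := PERIODS_BY_CATEGORY.getD ((PySem.Dict.mk poi).getD "category" "") []
  if periods.contains period_preference then period_preference
  else match periods with
    | [] => "tarde"
    | p :: _ => p

-- ===== PRECONDITION & SPEC =====
def Spec_assign_time_period_py (poi : List (String × String)) (period_preference : String) (out : String) : Prop := out = assign_time_period_py_alt poi period_preference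
instance (poi : List (String × String)) (period_preference : String) (out : String) : Decidable (Spec_assign_time_period_py poi period_preference out) := by unfold Spec_assign_time_period_py; infer_instance

-- ===== CLAIM (what is proved, stated in full; the proofs are below) =====
def Claim_equal_assign_time_period_py : Prop := ∀ (poi : List (String × String)) (period_preference : String), Dom_assign_time_period_py poi period_preference → Spec_assign_time_period_py poi period_preference (assign_time_period_py poi period_preference)

-- ===== LEMMAS AND PROOFS =====

-- multiset of periods keyed by cat, in table order (one copy per occurrence of cat)
def periodsOf (pcs : List (String × List String)) (cat : String) : List String :=
  pcs.flatMap (fun e => List.replicate (e.2.count cat) e.1)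

theorem inner_fold_getD (cs : List String) (p cat : String)
    (d : PySem.Dict String (List String)) :
    (cs.foldl (fun d c => d.modify c [] (fun l => l ++ [p])) d).getD cat []
      = d.getD cat [] ++ List.replicate (cs.count cat) p := by
  induction cs generalizing d with
  | nil => simp
  | cons c cs ih =>
    simp only [List.foldl_cons, ih, PySem.Dict.getD_modify, List.count_cons]
    by_cases h : cat = c
    · subst h
      simp [List.replicate_succ]
    · have h2 : ¬ (c = cat) := fun hh => h hh.symm
      simp [h, h2]

theorem index_getD (pcs : List (String × List String)) (cat : String)
    (d : PySem.Dict String (List String)) :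
    (pcs.foldl (fun d e => e.2.foldl (fun d c => d.modify c [] (fun l => l ++ [e.1])) d) d).getD cat []
      = d.getD cat [] ++ periodsOf pcs cat := by
  induction pcs generalizing d with
  | nil => simp [periodsOf]
  | cons e rest ih =>
    simp only [List.foldl_cons, ih, inner_fold_getD, periodsOf, List.flatMap_cons,
      List.append_assoc]

theorem contains_repl (n : Nat) (x y : String) :
    (List.replicate n x).contains y = (!(n == 0) && (x == y)) := by
  cases n with
  | zero => simp
  | succ n =>
    have : y ∈ List.replicate (n + 1) x ↔ y = x := by
      simp [List.mem_replicate]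
    by_cases h : y = x
    · subst h
      simp [this]
    · have h2 : ¬ (x = y) := fun hh => h hh.symm
      simp [this, h, h2]

theorem head?_repl (n : Nat) (x : String) :
    (List.replicate n x).head? = if n = 0 then none else some x := by
  cases n <;> simp [List.replicate_succ]

theorem loop1_eq (pcs : List (String × List String)) (cat pref : String) :
    atpLoop1 pcs cat pref
      = if (periodsOf pcs cat).contains pref then some pref else none := by
  induction pcs with
  | nil => simp [atpLoop1, periodsOf]
  | cons e rest ih =>
    obtain ⟨period, cats⟩ := e
    simp only [atpLoop1, ih, periodsOf, List.flatMap_cons, List.contains_append, contains_repl]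
    obtain ⟨c, hc0⟩ : ∃ c, (List.flatMap (fun e => List.replicate (List.count cat e.2) e.1) rest).contains pref = c := ⟨_, rfl⟩
    simp only [hc0]
    by_cases hmem : cat ∈ cats
    · have hc : ¬ List.count cat cats = 0 := by simp [List.count_eq_zero, hmem]
      by_cases hp : period = pref
      · subst hp
        simp [hmem, hc]
      · simp [hmem, hp]
    · have hc : List.count cat cats = 0 := by simp [List.count_eq_zero, hmem]
      simp [hmem, hc]

theorem loop2_eq (pcs : List (String × List String)) (cat : String) :
    atpLoop2 pcs cat = (periodsOf pcs cat).head? := by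
  induction pcs with
  | nil => simp [atpLoop2, periodsOf]
  | cons e rest ih =>
    obtain ⟨period, cats⟩ := e
    simp only [atpLoop2, ih, periodsOf, List.flatMap_cons, List.head?_append, head?_repl]
    obtain ⟨h, hh0⟩ : ∃ h, (List.flatMap (fun e => List.replicate (List.count cat e.2) e.1) rest).head? = h := ⟨_, rfl⟩
    simp only [hh0]
    by_cases hmem : cat ∈ cats
    · have hc : ¬ List.count cat cats = 0 := by simp [List.count_eq_zero, hmem]
      simp [hmem, hc]
    · have hc : List.count cat cats = 0 := by simp [List.count_eq_zero, hmem]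
      simp [hmem, hc]

-- ===== VERDICT (by name: the statement is the Claim_ definition above) =====
theorem assign_time_period_py_spec : Claim_equal_assign_time_period_py := by
  intro poi pref _
  unfold Spec_assign_time_period_py assign_time_period_py assign_time_period_py_alt
        PERIODS_BY_CATEGORY
  simp only [loop1_eq, loop2_eq, index_getD, PySem.Dict.getD_empty, List.nil_append]
  generalize periodsOf PERIOD_CATEGORIES.items ((PySem.Dict.mk poi).getD "category" "") = P
  cases P with
  | nil => simp
  | cons p rest =>
    by_cases h : pref = p ∨ pref ∈ rest
    · simp [h]
    · simp [h]
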